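-- pv_equiv track=rewrite | github.com/EgypTeam/etops | extscripts/python/dotnet_app_inspector.py | collect_leading_attributes
-- ===== SOURCE A (Python) =====
-- from typing import Dict, List, Optional
--
-- def collect_leading_attributes(stripped_code: str, start_idx: int) -> List[str]:
--     """
--     Collects contiguous attribute lines (starting with '[') immediately
--     preceding a declaration (class/method/etc).
--     """
--     attrs = []
--     i = start_idx
--     while True:
--         prev_nl = stripped_code.rfind("\n", 0, i)
--         if prev_nl == -1:
--             break
--         line_start = stripped_code.rfind("\n", 0, prev_nl)
--         line_start = 0 if line_start == -1 else line_start + 1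
--         line = stripped_code[line_start:prev_nl].strip()
--         if not line:
--             i = line_start
--             continue
--         if line.startswith("["):
--             attrs.append(line)
--             i = line_start
--             continue
--         break
--     attrs.reverse()
--     return attrs
-- ===== SOURCE B (Python) =====
-- def collect_leading_attributes(stripped_code: str, start_idx: int):
--     """Idiomatic rewrite: slice off the prefix, split it into lines once,
--     and scan the lines in reverse instead of repeated rfind index walking."""
--     prefix = stripped_code[:start_idx]
--     nl = prefix.rfind("\n")
--     if nl == -1:
--         return []
--     attrs = []
--     for raw in reversed(prefix[:nl].split("\n")):
--         line = raw.strip()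
--         if not line:
--             continue
--         if line.startswith("["):
--             attrs.append(line)
--         else:
--             break
--     attrs.reverse()
--     return attrs
-- ===== Notes on version B (the rewrite author's own statement) =====
-- stated objective: idiomatic
-- what changed: A walks backwards through the string with repeated rfind('\n',0,i) index arithmetic; B slices the prefix once, splits it into a line list and folds over that list in reverse, so no index bookkeeping remains.
import Mathlib
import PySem

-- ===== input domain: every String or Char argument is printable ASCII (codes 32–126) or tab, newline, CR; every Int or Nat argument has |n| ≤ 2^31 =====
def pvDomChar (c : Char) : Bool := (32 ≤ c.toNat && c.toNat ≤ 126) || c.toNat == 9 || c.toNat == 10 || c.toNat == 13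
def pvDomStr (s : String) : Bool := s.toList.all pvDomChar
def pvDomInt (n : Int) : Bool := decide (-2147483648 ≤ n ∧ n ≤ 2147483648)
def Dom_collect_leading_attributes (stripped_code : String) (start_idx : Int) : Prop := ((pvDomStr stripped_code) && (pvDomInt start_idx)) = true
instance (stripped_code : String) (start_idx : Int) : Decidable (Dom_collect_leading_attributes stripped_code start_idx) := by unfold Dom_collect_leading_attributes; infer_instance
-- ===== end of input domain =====

-- B re-implements A's repeated rfind index-walking by slicing the prefix once, splitting it
-- into lines and scanning the line list in reverse (objective: idiomatic; same cost).

-- ===== PORT A =====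
-- A's while-loop: each step looks up the newline before index i, cuts out the previous line,
-- and walks i upward.  Fuel (length+1) bounds the iterations; the equivalence proof shows it
-- is never exhausted (each continuing step consumes one newline of the prefix).
def claLoopA (cs : List Char) (fuel : Nat) (i : Int) (attrs : List (List Char)) : List (List Char) :=
  match fuel with
  | 0 => attrs.reverse
  | fuel + 1 =>
    let prev_nl := PySem.Chars.rfindFrom cs ['\n'] 0 (some i)
    if prev_nl = -1 then attrs.reverse
    else
      let ls0 := PySem.Chars.rfindFrom cs ['\n'] 0 (some prev_nl)
      let line_start : Int := if ls0 = -1 then 0 else ls0 + 1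
      let line := PySem.Chars.strip (PySem.Chars.slice cs (some line_start) (some prev_nl))
      if line = [] then claLoopA cs fuel line_start attrs
      else if PySem.Chars.startswith line ['['] then claLoopA cs fuel line_start (attrs ++ [line])
      else attrs.reverse

def collect_leading_attributes (stripped_code : String) (start_idx : Int) : List String :=
  (claLoopA stripped_code.toList (stripped_code.toList.length + 1) start_idx []).map String.ofList

-- ===== PORT B =====
-- B's for-loop over the reversed line list, with `continue` on blank lines and `break`
-- on the first non-attribute line; attrs is appended to and reversed at the end, as in Source B.
def clbScan (lines : List (List Char)) (attrs : List (List Char)) : List (List Char) :=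
  match lines with
  | [] => attrs
  | raw :: rest =>
    let line := PySem.Chars.strip raw
    if line = [] then clbScan rest attrs
    else if PySem.Chars.startswith line ['['] then clbScan rest (attrs ++ [line])
    else attrs

def collect_leading_attributes_alt (stripped_code : String) (start_idx : Int) : List String :=
  let pre := PySem.Chars.slice stripped_code.toList none (some start_idx)
  let nl := PySem.Chars.rfind pre ['\n']
  if nl = -1 then []
  else
    let lines := PySem.Chars.splitOn (PySem.Chars.slice pre none (some nl)) ['\n']
    ((clbScan lines.reverse []).reverse).map String.ofList

-- ===== PRECONDITION & SPEC =====
def Spec_collect_leading_attributes (stripped_code : String) (start_idx : Int) (out : List String) : Prop := out = collect_leading_attributes_alt stripped_code start_idx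
instance (stripped_code : String) (start_idx : Int) (out : List String) : Decidable (Spec_collect_leading_attributes stripped_code start_idx out) := by unfold Spec_collect_leading_attributes; infer_instance

-- ===== CLAIM (what is proved, stated in full; the proofs are below) =====
def Claim_equal_collect_leading_attributes : Prop := ∀ (stripped_code : String) (start_idx : Int), Dom_collect_leading_attributes stripped_code start_idx → Spec_collect_leading_attributes stripped_code start_idx (collect_leading_attributes stripped_code start_idx)

-- ===== LEMMAS AND PROOFS =====

-- ==== rfind ('\n') characterisation ====

-- ['\n'].isPrefixOf just tests the head.
theorem prefNl (l : List Char) : (['\n'].isPrefixOf l) = (l.head? == some '\n') := by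
  cases l <;> simp [List.isPrefixOf, eq_comm]

theorem goSucc (s : List Char) (j : Nat) :
    PySem.Chars.rfind.go s ['\n'] (j+1)
      = if (s.drop (j+1)).head? = some '\n' then ((j+1 : Nat) : Int) else PySem.Chars.rfind.go s ['\n'] j := by
  simp [PySem.Chars.rfind.go, prefNl]

theorem goZero (s : List Char) :
    PySem.Chars.rfind.go s ['\n'] 0 = if s.head? = some '\n' then 0 else -1 := by
  simp [PySem.Chars.rfind.go, prefNl]

theorem goAt (s : List Char) (j : Nat) (h : (s.drop j).head? = some '\n') :
    PySem.Chars.rfind.go s ['\n'] j = (j : Int) := by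
  cases j with
  | zero => rw [goZero, if_pos (by simpa using h)]; simp
  | succ j => rw [goSucc, if_pos h]

theorem goSkip (s : List Char) (j : Nat) (h : ¬ (s.drop (j+1)).head? = some '\n') :
    PySem.Chars.rfind.go s ['\n'] (j+1) = PySem.Chars.rfind.go s ['\n'] j := by
  rw [goSucc, if_neg h]

theorem rfindGo_ge (s : List Char) (j : Nat) : -1 ≤ PySem.Chars.rfind.go s ['\n'] j := by
  induction j with
  | zero =>
    simp only [PySem.Chars.rfind.go]
    split
    · omega
    · omega
  | succ j ih =>
    simp only [PySem.Chars.rfind.go]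
    split
    · omega
    · exact ih

theorem rfind_ge (s : List Char) : -1 ≤ PySem.Chars.rfind s ['\n'] := rfindGo_ge s s.length

-- positions below P.length read the same characters in P ++ [c] and P
theorem rfindGo_append (P : List Char) (c : Char) (j : Nat) (hj : j < P.length) :
    PySem.Chars.rfind.go (P ++ [c]) ['\n'] j = PySem.Chars.rfind.go P ['\n'] j := by
  induction j with
  | zero =>
    rw [goZero, goZero]
    cases P with
    | nil => simp at hj
    | cons a t => simp
  | succ j ih =>
    rw [goSucc, goSucc, List.drop_append_of_le_length (by omega)]
    have hne : P.drop (j+1) ≠ [] := by simp; omega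
    rw [List.head?_append_of_ne_nil _ hne, ih (by omega)]

theorem rfind_nil : PySem.Chars.rfind ([] : List Char) ['\n'] = -1 := by decide

theorem rfind_append_nl (P : List Char) : PySem.Chars.rfind (P ++ ['\n']) ['\n'] = (P.length : Int) := by
  unfold PySem.Chars.rfind
  rw [show (P ++ ['\n']).length = P.length + 1 from by simp]
  rw [goSkip _ _ (by simp)]
  exact goAt _ _ (by simp)

theorem rfind_append_other (P : List Char) (c : Char) (hc : c ≠ '\n') :
    PySem.Chars.rfind (P ++ [c]) ['\n'] = PySem.Chars.rfind P ['\n'] := by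
  unfold PySem.Chars.rfind
  rw [show (P ++ [c]).length = P.length + 1 from by simp]
  rw [goSkip _ _ (by simp)]
  cases hP : P.length with
  | zero =>
    have hPnil : P = [] := List.eq_nil_of_length_eq_zero hP
    subst hPnil
    rw [goZero, goZero]
    simp [hc]
  | succ n =>
    have l1 : PySem.Chars.rfind.go (P ++ [c]) ['\n'] (n+1) = PySem.Chars.rfind.go (P ++ [c]) ['\n'] n := by
      apply goSkip
      rw [show n + 1 = P.length from hP.symm]
      simp [hc]
    have l2 : PySem.Chars.rfind.go P ['\n'] (n+1) = PySem.Chars.rfind.go P ['\n'] n := by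
      apply goSkip
      rw [show n + 1 = P.length from hP.symm]
      simp
    rw [l1, l2, rfindGo_append P c n (by omega)]

-- rfind = -1 exactly when there is no newline
theorem rfind_eq_neg_one_iff (P : List Char) : PySem.Chars.rfind P ['\n'] = -1 ↔ '\n' ∉ P := by
  induction P using List.reverseRecOn with
  | nil => simp [rfind_nil]
  | append_singleton P c ih =>
    by_cases hc : c = '\n'
    · subst hc
      simp [rfind_append_nl]
    · rw [rfind_append_other P c hc, ih]
      simp
      exact fun _ h => hc h.symm

-- a nonnegative rfind splits P at its last newline
theorem rfind_decomp (P : List Char) (h : PySem.Chars.rfind P ['\n'] ≠ -1) :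
    ∃ T R, P = T ++ '\n' :: R ∧ '\n' ∉ R ∧ PySem.Chars.rfind P ['\n'] = (T.length : Int) := by
  induction P using List.reverseRecOn with
  | nil => simp [rfind_nil] at h
  | append_singleton P c ih =>
    by_cases hc : c = '\n'
    · subst hc
      exact ⟨P, [], by simp, by simp, rfind_append_nl P⟩
    · rw [rfind_append_other P c hc] at h ⊢
      obtain ⟨T, R, hP, hR, hr⟩ := ih h
      exact ⟨T, R ++ [c], by simp [hP], by simp [hR]; exact fun h => hc h.symm, hr⟩

-- ==== splitOn ('\n') lemmas ====

theorem sgoNil (f : Nat) (cur : List Char) (acc : List (List Char)) :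
    PySem.Chars.splitOn.go ['\n'] f [] cur acc = (cur.reverse :: acc).reverse := by
  cases f <;> simp [PySem.Chars.splitOn.go]

theorem sgoSep (f : Nat) (rest cur : List Char) (acc : List (List Char)) :
    PySem.Chars.splitOn.go ['\n'] (f+1) ('\n'::rest) cur acc
      = PySem.Chars.splitOn.go ['\n'] f rest [] (cur.reverse :: acc) := by
  simp [PySem.Chars.splitOn.go, List.isPrefixOf]

theorem sgoChar (f : Nat) (c : Char) (rest cur : List Char) (acc : List (List Char)) (h : c ≠ '\n') :
    PySem.Chars.splitOn.go ['\n'] (f+1) (c::rest) cur acc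
      = PySem.Chars.splitOn.go ['\n'] f rest (c::cur) acc := by
  simp [PySem.Chars.splitOn.go, List.isPrefixOf]
  exact fun h' => absurd h'.symm h

theorem goFuel (l : List Char) (f1 f2 : Nat) (cur : List Char) (acc : List (List Char))
    (h1 : l.length < f1) (h2 : l.length < f2) :
    PySem.Chars.splitOn.go ['\n'] f1 l cur acc = PySem.Chars.splitOn.go ['\n'] f2 l cur acc := by
  induction l generalizing f1 f2 cur acc with
  | nil => rw [sgoNil, sgoNil]
  | cons c rest ih =>
    simp only [List.length_cons] at h1 h2
    obtain ⟨g1, rfl⟩ : ∃ g1, f1 = g1 + 1 := ⟨f1 - 1, by omega⟩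
    obtain ⟨g2, rfl⟩ : ∃ g2, f2 = g2 + 1 := ⟨f2 - 1, by omega⟩
    by_cases hc : c = '\n'
    · subst hc; rw [sgoSep, sgoSep]; exact ih _ _ _ _ (by omega) (by omega)
    · rw [sgoChar _ _ _ _ _ hc, sgoChar _ _ _ _ _ hc]; exact ih _ _ _ _ (by omega) (by omega)

theorem goNoNl (l : List Char) (f : Nat) (cur : List Char) (acc : List (List Char))
    (hf : l.length < f) (h : '\n' ∉ l) :
    PySem.Chars.splitOn.go ['\n'] f l cur acc = ((cur.reverse ++ l) :: acc).reverse := by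
  induction l generalizing f cur with
  | nil => rw [sgoNil]; simp
  | cons c rest ih =>
    simp only [List.length_cons] at hf
    obtain ⟨g, rfl⟩ : ∃ g, f = g + 1 := ⟨f - 1, by omega⟩
    have hc : c ≠ '\n' := fun hh => h (by simp [hh])
    rw [sgoChar _ _ _ _ _ hc, ih _ _ (by omega) (fun hh => h (by simp [hh]))]
    simp

theorem goLastSep (R : List Char) (hR : '\n' ∉ R) (T : List Char) (f : Nat) (cur : List Char)
    (acc : List (List Char)) (hf : T.length + R.length + 1 < f) :
    PySem.Chars.splitOn.go ['\n'] f (T ++ '\n' :: R) cur acc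
      = PySem.Chars.splitOn.go ['\n'] f T cur acc ++ [R] := by
  induction T generalizing f cur acc with
  | nil =>
    obtain ⟨g, rfl⟩ : ∃ g, f = g + 1 := ⟨f - 1, by omega⟩
    rw [List.nil_append, sgoSep, goNoNl R g [] _ (by omega) hR, sgoNil]
    simp
  | cons c T ih =>
    simp only [List.length_cons] at hf
    obtain ⟨g, rfl⟩ : ∃ g, f = g + 1 := ⟨f - 1, by omega⟩
    by_cases hc : c = '\n'
    · subst hc
      rw [List.cons_append, sgoSep, sgoSep]
      rw [ih _ _ _ (by omega)]
    · rw [List.cons_append, sgoChar _ _ _ _ _ hc, sgoChar _ _ _ _ _ hc]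
      exact ih _ _ _ (by omega)

theorem splitOn_no_nl (P : List Char) (h : '\n' ∉ P) : PySem.Chars.splitOn P ['\n'] = [P] := by
  unfold PySem.Chars.splitOn
  rw [goNoNl P (P.length + 1) [] [] (by omega) h]
  simp

theorem splitOn_last (T R : List Char) (hR : '\n' ∉ R) :
    PySem.Chars.splitOn (T ++ '\n' :: R) ['\n'] = PySem.Chars.splitOn T ['\n'] ++ [R] := by
  unfold PySem.Chars.splitOn
  rw [goLastSep R hR T _ [] [] (by simp)]
  rw [goFuel T _ (T.length + 1) [] [] (by simp) (by omega)]

-- ==== bridging rfindFrom / slice ====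

theorem rfindFrom_zero (cs : List Char) (i : Int) :
    PySem.Chars.rfindFrom cs ['\n'] 0 (some i)
      = PySem.Chars.rfind (cs.take (PySem.List.clampIdx cs.length i)) ['\n'] := by
  have hsel : ∀ r : Int, -1 ≤ r → (if r = -1 then (-1:Int) else r) = r := by
    intro r h
    split_ifs with hr
    · rw [hr]
    · rfl
  unfold PySem.Chars.rfindFrom PySem.List.clampIdx
  simp only [lt_self_iff_false, if_false, List.drop_zero, zero_add, Int.toNat_zero]
  simp only [hsel _ (rfind_ge _)]
  split_ifs <;>
    first
      | (exfalso; omega)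
      | rfl
      | (congr 2 <;> omega)

theorem slice_to_clamp (cs : List Char) (i : Int) :
    PySem.List.slice cs none (some i) = cs.take (PySem.List.clampIdx cs.length i) := by
  simp [PySem.List.slice]

-- the reversed line list B scans, as a function of the prefix
def linesRev (Q : List Char) : List (List Char) :=
  if PySem.Chars.rfind Q ['\n'] = -1 then []
  else (PySem.Chars.splitOn (Q.take (PySem.Chars.rfind Q ['\n']).toNat) ['\n']).reverse

theorem claLoopA_succ (cs : List Char) (f : Nat) (i : Int) (attrs : List (List Char)) :
    claLoopA cs (f+1) i attrs =
      if PySem.Chars.rfindFrom cs ['\n'] 0 (some i) = -1 then attrs.reverse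
      else
        let ls0 := PySem.Chars.rfindFrom cs ['\n'] 0 (some (PySem.Chars.rfindFrom cs ['\n'] 0 (some i)))
        let line_start : Int := if ls0 = -1 then 0 else ls0 + 1
        let line := PySem.Chars.strip (PySem.Chars.slice cs (some line_start) (some (PySem.Chars.rfindFrom cs ['\n'] 0 (some i))))
        if line = [] then claLoopA cs f line_start attrs
        else if PySem.Chars.startswith line ['['] then claLoopA cs f line_start (attrs ++ [line])
        else attrs.reverse := rfl

theorem clampIdx_of_le (n m : Nat) (h : m ≤ n) : PySem.List.clampIdx n ((m : Nat) : Int) = m := by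
  rw [PySem.List.clampIdx_natCast]
  omega

-- A's rfind("\n", 0, e) for a natural in-range index e is rfind over the length-e prefix
theorem rfindFrom_nat (cs : List Char) (e : Nat) (he : e ≤ cs.length) :
    PySem.Chars.rfindFrom cs ['\n'] 0 (some (e : Int)) = PySem.Chars.rfind (cs.take e) ['\n'] := by
  rw [rfindFrom_zero, clampIdx_of_le _ _ he]

-- the main loop correspondence
theorem mainLoop (cs : List Char) (fuel : Nat) :
    ∀ (e : Nat) (attrs : List (List Char)), e ≤ cs.length →
    (cs.take e).count '\n' < fuel →
    claLoopA cs fuel (e : Int) attrs = (clbScan (linesRev (cs.take e)) attrs).reverse := by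
  induction fuel with
  | zero => intro e attrs _ hcount; omega
  | succ fuel ih =>
    intro e attrs he hcount
    have hQlen : (cs.take e).length = e := by simp; omega
    rw [claLoopA_succ, rfindFrom_nat cs e he]
    by_cases hr : PySem.Chars.rfind (cs.take e) ['\n'] = -1
    · rw [if_pos hr]
      unfold linesRev
      rw [if_pos hr]
      simp [clbScan]
    · rw [if_neg hr]
      obtain ⟨T, R, hQd, hR, hrT⟩ := rfind_decomp (cs.take e) hr
      have hTRe : T.length + R.length + 1 = e := by
        have := congrArg List.length hQd
        simp at this
        omega
      have hTcs : cs.take T.length = T := by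
        have h1 : (cs.take e).take T.length = T := by rw [hQd, List.take_left]
        rwa [List.take_take, min_eq_left (by omega)] at h1
      have hls : PySem.Chars.rfindFrom cs ['\n'] 0 (some (PySem.Chars.rfind (cs.take e) ['\n']))
          = PySem.Chars.rfind T ['\n'] := by
        rw [hrT, rfindFrom_nat cs T.length (by omega), hTcs]
      have hlines : linesRev (cs.take e) = (PySem.Chars.splitOn T ['\n']).reverse := by
        unfold linesRev
        rw [if_neg hr, hrT]
        simp only [Int.toNat_natCast]
        rw [show (cs.take e).take T.length = T from by rw [hQd, List.take_left]]
      simp only [hls]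
      by_cases hr2 : PySem.Chars.rfind T ['\n'] = -1
      · -- no further newline: the line is T itself, and the loop ends after it
        have hTnl : '\n' ∉ T := (rfind_eq_neg_one_iff T).mp hr2
        rw [if_pos hr2]
        have hline : PySem.Chars.slice cs (some 0) (some (PySem.Chars.rfind (cs.take e) ['\n'])) = T := by
          rw [hrT]
          simp only [PySem.Chars.slice_eq_listSlice, PySem.List.slice_zero_start]
          rw [PySem.List.slice_to_natCast, hTcs]
        rw [hline, hlines]
        rw [splitOn_no_nl T hTnl]
        have hrec : ∀ attrs' : List (List Char), claLoopA cs fuel ((0:Nat) : Int) attrs' = attrs'.reverse := by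
          intro attrs'
          have h0 : ((cs.take 0).count '\n') < fuel := by
            have : 0 < (cs.take e).count '\n' := List.count_pos_iff.mpr (by rw [hQd]; simp)
            simp
            omega
          rw [ih 0 attrs' (by omega) h0]
          simp [linesRev, rfind_nil, clbScan]
        simp only [List.reverse_cons, List.reverse_nil, List.nil_append, clbScan]
        split_ifs with h1 h2
        · exact_mod_cast hrec attrs
        · exact_mod_cast hrec (attrs ++ [PySem.Chars.strip T])
        · rfl
      · obtain ⟨T2, lineR, hTd, hlR, hrT2⟩ := rfind_decomp T hr2
        rw [if_neg hr2, hrT2]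
        have hk1 : ((T2.length : Int) + 1) = ((T2.length + 1 : Nat) : Int) := by push_cast; ring
        have hT2len : T2.length + 1 ≤ T.length := by
          have := congrArg List.length hTd
          simp at this
          omega
        have htk : cs.take (T2.length + 1) = T2 ++ ['\n'] := by
          have h1 : cs.take (T2.length + 1) = T.take (T2.length + 1) := by
            rw [← hTcs, List.take_take, min_eq_left hT2len]
          rw [h1, hTd, show T2 ++ '\n' :: lineR = (T2 ++ ['\n']) ++ lineR from by simp,
            List.take_left' (by simp)]
        have hline : PySem.Chars.slice cs (some ((T2.length : Int) + 1))
            (some (PySem.Chars.rfind (cs.take e) ['\n'])) = lineR := by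
          rw [hrT, hk1]
          simp only [PySem.Chars.slice_eq_listSlice]
          rw [PySem.List.slice_natCast]
          rw [← List.drop_take, hTcs, hTd,
            show T2 ++ '\n' :: lineR = (T2 ++ ['\n']) ++ lineR from by simp]
          rw [show T2.length + 1 = (T2 ++ ['\n']).length from by simp, List.drop_left]
        rw [hline, hlines,
          show PySem.Chars.splitOn T ['\n'] = PySem.Chars.splitOn T2 ['\n'] ++ [lineR] from by
            rw [hTd]; exact splitOn_last T2 lineR hlR]
        have hcount' : (cs.take (T2.length + 1)).count '\n' < fuel := by
          have h1 : (cs.take e).count '\n' = (T2 ++ ['\n']).count '\n' + lineR.count '\n' + R.count '\n' + 1 := by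
            rw [hQd, hTd]
            simp [List.count_append]
            ring
          have h2 : lineR.count '\n' = 0 := List.count_eq_zero.mpr hlR
          have h3 : R.count '\n' = 0 := List.count_eq_zero.mpr hR
          rw [htk]
          omega
        have hrec : ∀ attrs' : List (List Char), claLoopA cs fuel ((T2.length : Int) + 1) attrs'
            = (clbScan ((PySem.Chars.splitOn T2 ['\n']).reverse) attrs').reverse := by
          intro attrs'
          rw [hk1, ih (T2.length + 1) attrs' (by omega) hcount']
          congr 1
          unfold linesRev
          rw [htk, rfind_append_nl]
          rw [if_neg (by omega)]
          simp only [Int.toNat_natCast, List.take_left]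
        simp only [List.reverse_append, List.reverse_cons, List.reverse_nil, List.nil_append,
          List.singleton_append, clbScan]
        split_ifs with h1 h2
        · exact hrec attrs
        · exact hrec (attrs ++ [PySem.Chars.strip lineR])
        · rfl

-- the first iteration only depends on the clamped index
theorem claLoopA_clamp (cs : List Char) (fuel : Nat) (i : Int) (attrs : List (List Char)) :
    claLoopA cs (fuel + 1) i attrs
      = claLoopA cs (fuel + 1) ((PySem.List.clampIdx cs.length i : Nat) : Int) attrs := by
  rw [claLoopA_succ, claLoopA_succ, rfindFrom_zero cs i,
    rfindFrom_zero cs ((PySem.List.clampIdx cs.length i : Nat) : Int),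
    PySem.List.clampIdx_natCast, min_eq_left (PySem.List.clampIdx_le _ _)]

-- ===== VERDICT (by name: the statement is the Claim_ definition above) =====
theorem collect_leading_attributes_spec : Claim_equal_collect_leading_attributes := by
  intro s i _
  unfold Spec_collect_leading_attributes
  unfold collect_leading_attributes collect_leading_attributes_alt
  have hQ : PySem.Chars.slice s.toList none (some i)
      = s.toList.take (PySem.List.clampIdx s.toList.length i) := by
    rw [PySem.Chars.slice_eq_listSlice, slice_to_clamp]
  rw [claLoopA_clamp s.toList s.toList.length i []]
  rw [mainLoop s.toList (s.toList.length + 1) (PySem.List.clampIdx s.toList.length i) []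
    (PySem.List.clampIdx_le _ _)
    (by
      have h1 := List.count_le_length (l := s.toList.take (PySem.List.clampIdx s.toList.length i)) (a := '\n')
      have h2 : (s.toList.take (PySem.List.clampIdx s.toList.length i)).length ≤ s.toList.length := by
        simp
      omega)]
  simp only [hQ]
  by_cases hr : PySem.Chars.rfind (s.toList.take (PySem.List.clampIdx s.toList.length i)) ['\n'] = -1
  · rw [if_pos hr]
    unfold linesRev
    rw [if_pos hr]
    simp [clbScan]
  · rw [if_neg hr]
    obtain ⟨T, R, hQd, hR, hrT⟩ := rfind_decomp _ hr
    have hlenQ : T.length < (s.toList.take (PySem.List.clampIdx s.toList.length i)).length := by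
      rw [hQd]
      simp
    have hsl : PySem.Chars.slice (s.toList.take (PySem.List.clampIdx s.toList.length i)) none
        (some (PySem.Chars.rfind (s.toList.take (PySem.List.clampIdx s.toList.length i)) ['\n']))
        = (s.toList.take (PySem.List.clampIdx s.toList.length i)).take
            (PySem.Chars.rfind (s.toList.take (PySem.List.clampIdx s.toList.length i)) ['\n']).toNat := by
    -- both are the length-r prefix: Python's slice clamp agrees with toNat for this in-range r
      rw [PySem.Chars.slice_eq_listSlice, slice_to_clamp, hrT, Int.toNat_natCast,
        PySem.List.clampIdx_natCast, min_eq_left (by omega)]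
    rw [hsl]
    unfold linesRev
    rw [if_neg hr]
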